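-- pv_equiv track=rewrite | github.com/wreing/pybites | 104/pipe.py | split_in_columns
-- ===== SOURCE A (Python) =====
-- MESSAGE = """Hello world!
-- We hope that you are learning a lot of Python.
-- Have fun with our Bites of Py.
-- Keep calm and code in Python!
-- Become a PyBites ninja!"""
--
-- def split_in_columns(message=MESSAGE):
--     """Split the message by newline (\n) and join it together on '|'
--        (pipe), return the obtained output string"""
--     a = message.split('\n')
--     r = ''
--     for x in a:
--         if r == '':
--             r = x
--         else:
--             r = r+'|' + x
--     return r
-- ===== SOURCE B (Python) =====
-- MESSAGE = """Hello world!
-- We hope that you are learning a lot of Python.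
-- Have fun with our Bites of Py.
-- Keep calm and code in Python!
-- Become a PyBites ninja!"""
--
-- def split_in_columns(message=MESSAGE):
--     """Split the message by newline (\n) and join it together on '|'
--        (pipe), return the obtained output string"""
--     return message.replace('\n', '|')
-- ===== Notes on version B (the rewrite author's own statement) =====
-- stated objective: simpler
-- what changed: Replaces the split-into-list-then-accumulate-with-conditional-pipe loop by a single replace of '\n' with '|', with no intermediate list and no loop.
-- intended difference: On messages starting with '\n', A's 'if r == ""' guard silently drops the pipes for the leading empty split parts (A('\n') = ''), while B returns the full '|'-join with the leading pipes (B('\n') = '|'), which is what the docstring's split-and-join specifies. — e.g. on split_in_columns("\n"): A returns "", B returns "|"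
import Mathlib
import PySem

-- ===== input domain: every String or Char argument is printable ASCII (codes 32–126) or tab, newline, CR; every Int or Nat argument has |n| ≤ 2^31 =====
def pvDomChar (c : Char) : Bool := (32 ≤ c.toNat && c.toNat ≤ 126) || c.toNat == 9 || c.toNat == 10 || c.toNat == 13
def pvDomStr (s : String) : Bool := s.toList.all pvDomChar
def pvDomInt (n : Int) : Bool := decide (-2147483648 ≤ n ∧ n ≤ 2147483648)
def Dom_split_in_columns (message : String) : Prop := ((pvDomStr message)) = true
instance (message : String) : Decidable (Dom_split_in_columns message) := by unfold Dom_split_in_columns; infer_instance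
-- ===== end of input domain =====

-- B replaces A's split-then-conditionally-concatenate loop by one replace('\n','|'); on messages
-- starting with '\n' A silently drops the leading pipes and B returns the intended full join (see D_).

-- ===== PORT A =====
-- A: a = message.split('\n'); r = ''; for x in a: r = x if r == '' else r+'|'+x
def pvJoinStep (r x : List Char) : List Char :=
  if r = [] then x else r ++ ['|'] ++ x

def split_in_columns (message : String) : String :=
  String.ofList ((PySem.Chars.splitOn message.toList ['\n']).foldl pvJoinStep [])

-- ===== PORT B =====
-- B: return message.replace('\n', '|')
def split_in_columns_alt (message : String) : String :=
  PySem.Str.replace message "\n" "|"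

-- ===== PRECONDITION & SPEC =====
-- On messages starting with '\n', A's `if r == ''` guard drops the pipes for the leading empty
-- split parts (A "\n" = ""), while B returns the full '|'-join including the leading pipes
-- (B "\n" = "|"), which is what the docstring's split-and-join specifies.
def D_split_in_columns (message : String) : Prop := message.toList.head? = some '\n'
instance (message : String) : Decidable (D_split_in_columns message) := by
  unfold D_split_in_columns; infer_instance

def Spec_split_in_columns (message : String) (out : String) : Prop :=
  ¬ D_split_in_columns message → out = split_in_columns_alt message
instance (message : String) (out : String) : Decidable (Spec_split_in_columns message out) := by
  unfold Spec_split_in_columns; infer_instance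

def pvDiffWitness_split_in_columns : String := "\n"
def pvDiffWitnessOut_split_in_columns : String × String := ("", "|")

-- ===== CLAIM (what is proved, stated in full; the proofs are below) =====
def Claim_unchanged_split_in_columns : Prop :=
  ∀ (message : String), Dom_split_in_columns message →
    Spec_split_in_columns message (split_in_columns message)

def Claim_changed_split_in_columns : Prop :=
  Dom_split_in_columns (pvDiffWitness_split_in_columns) ∧
  D_split_in_columns (pvDiffWitness_split_in_columns) ∧
  split_in_columns (pvDiffWitness_split_in_columns) = pvDiffWitnessOut_split_in_columns.1 ∧
  split_in_columns_alt (pvDiffWitness_split_in_columns) = pvDiffWitnessOut_split_in_columns.2 ∧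
  pvDiffWitnessOut_split_in_columns.1 ≠ pvDiffWitnessOut_split_in_columns.2

def Claim_exact_split_in_columns : Prop :=
  ∀ (message : String), Dom_split_in_columns message → D_split_in_columns message →
    split_in_columns message ≠ split_in_columns_alt message

-- ===== LEMMAS AND PROOFS =====

/-- Reference: Python's split on a single '\n'. -/
def pvSplit1 : List Char → List (List Char)
  | [] => [[]]
  | c :: t => if c = '\n' then [] :: pvSplit1 t else (pvSplit1 t).modifyHead (c :: ·)

/-- Reference: replace each '\n' by '|'. -/
def pvRep (l : List Char) : List Char := l.map (fun c => if c = '\n' then '|' else c)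

/-- Reference: '|'.join. -/
def pvJoin : List (List Char) → List Char
  | [] => []
  | q :: qs => q ++ qs.flatMap (fun x => '|' :: x)

theorem pvSplit1_ne_nil (l : List Char) : pvSplit1 l ≠ [] := by
  induction l with
  | nil => simp [pvSplit1]
  | cons c t ih =>
    simp only [pvSplit1]
    split_ifs
    · simp
    · cases h : pvSplit1 t with
      | nil => exact absurd h ih
      | cons q qs => simp [List.modifyHead]

theorem pvSplitOn_go_eq (l : List Char) (fuel : Nat) (cur : List Char) (acc : List (List Char))
    (h : l.length ≤ fuel) :
    PySem.Chars.splitOn.go ['\n'] fuel l cur acc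
      = acc.reverse ++ (pvSplit1 l).modifyHead (cur.reverse ++ ·) := by
  induction l generalizing fuel cur acc with
  | nil =>
    cases fuel <;> simp [PySem.Chars.splitOn.go, pvSplit1, List.modifyHead]
  | cons c t ih =>
    cases fuel with
    | zero => simp at h
    | succ f =>
      simp only [PySem.Chars.splitOn.go]
      by_cases hc : c = '\n'
      · subst hc
        rw [if_pos (by simp [List.isPrefixOf])]
        simp only [List.length_cons] at h
        simp only [show (['\n'] : List Char).length = 1 from rfl, List.drop_succ_cons,
          List.drop_zero]
        rw [ih f [] (cur.reverse :: acc) (by omega)]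
        obtain ⟨q, qs, hq⟩ := List.exists_cons_of_ne_nil (pvSplit1_ne_nil t)
        simp [pvSplit1, hq, List.modifyHead]
      · rw [if_neg (by simp only [List.isPrefixOf, Bool.and_eq_true, beq_iff_eq]; exact fun hh => hc hh.1.symm)]
        simp only [List.length_cons] at h
        rw [ih f (c :: cur) acc (by omega)]
        obtain ⟨q, qs, hq⟩ := List.exists_cons_of_ne_nil (pvSplit1_ne_nil t)
        simp [pvSplit1, hq, hc, List.modifyHead]

theorem pvSplitOn_eq (l : List Char) : PySem.Chars.splitOn l ['\n'] = pvSplit1 l := by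
  unfold PySem.Chars.splitOn
  rw [pvSplitOn_go_eq l (l.length + 1) [] [] (by omega)]
  obtain ⟨q, qs, hq⟩ := List.exists_cons_of_ne_nil (pvSplit1_ne_nil l)
  simp [hq, List.modifyHead]

theorem pvReplace_go_eq (l : List Char) (fuel : Nat) (acc : List Char)
    (h : l.length ≤ fuel) :
    PySem.Chars.replace.go ['\n'] ['|'] fuel l acc = acc.reverse ++ pvRep l := by
  induction l generalizing fuel acc with
  | nil => cases fuel <;> simp [PySem.Chars.replace.go, pvRep]
  | cons c t ih =>
    cases fuel with
    | zero => simp at h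
    | succ f =>
      simp only [PySem.Chars.replace.go]
      simp only [List.length_cons] at h
      by_cases hc : c = '\n'
      · subst hc
        rw [if_pos (by simp [List.isPrefixOf])]
        simp only [show (['\n'] : List Char).length = 1 from rfl, List.drop_succ_cons,
          List.drop_zero]
        rw [ih f _ (by omega)]
        simp [pvRep]
      · rw [if_neg (by simp only [List.isPrefixOf, Bool.and_eq_true, beq_iff_eq]; exact fun hh => hc hh.1.symm)]
        rw [ih f _ (by omega)]
        simp [pvRep, hc]

theorem pvReplace_eq (l : List Char) : PySem.Chars.replace l ['\n'] ['|'] = pvRep l := by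
  unfold PySem.Chars.replace
  rw [if_neg (by simp)]
  simpa using pvReplace_go_eq l l.length [] le_rfl

theorem pvAlt_toList (message : String) :
    (split_in_columns_alt message).toList = pvRep message.toList := by
  unfold split_in_columns_alt
  rw [PySem.Str.toList_replace]
  simpa using pvReplace_eq message.toList

theorem pvRep_eq_join (l : List Char) : pvRep l = pvJoin (pvSplit1 l) := by
  induction l with
  | nil => simp [pvRep, pvSplit1, pvJoin]
  | cons c t ih =>
    obtain ⟨q, qs, hq⟩ := List.exists_cons_of_ne_nil (pvSplit1_ne_nil t)
    by_cases hc : c = '\n'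
    · subst hc
      rw [show pvRep ('\n' :: t) = '|' :: pvRep t from by simp [pvRep],
        show pvSplit1 ('\n' :: t) = [] :: pvSplit1 t from by simp [pvSplit1],
        ih, hq]
      simp [pvJoin]
    · rw [show pvRep (c :: t) = c :: pvRep t from by simp [pvRep, hc],
        show pvSplit1 (c :: t) = (pvSplit1 t).modifyHead (c :: ·) from by
          simp [pvSplit1, hc],
        ih, hq]
      simp [pvJoin, List.modifyHead]

theorem pvFoldl_ne_nil (parts : List (List Char)) (r : List Char) (h : r ≠ []) :
    parts.foldl pvJoinStep r = r ++ parts.flatMap (fun x => '|' :: x) := by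
  induction parts generalizing r with
  | nil => simp
  | cons x parts ih =>
    simp only [List.foldl_cons, List.flatMap_cons]
    rw [ih (pvJoinStep r x) (by simp [pvJoinStep, h])]
    simp [pvJoinStep, h]

theorem pvFoldl_length_le (parts : List (List Char)) (r : List Char) :
    (parts.foldl pvJoinStep r).length ≤ r.length + (parts.flatMap (fun x => '|' :: x)).length := by
  induction parts generalizing r with
  | nil => simp
  | cons x parts ih =>
    simp only [List.foldl_cons, List.flatMap_cons, List.length_append, List.length_cons]
    have h1 : (pvJoinStep r x).length ≤ r.length + 1 + x.length := by
      by_cases hr : r = [] <;> simp [pvJoinStep, hr] <;> omega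
    have h2 := ih (pvJoinStep r x)
    omega

theorem pvA_toList (message : String) :
    (split_in_columns message).toList
      = (pvSplit1 message.toList).foldl pvJoinStep [] := by
  unfold split_in_columns
  rw [pvSplitOn_eq]
  simp

-- ===== VERDICT (by name: the statement is the Claim_ definition above) =====
theorem split_in_columns_spec : Claim_unchanged_split_in_columns := by
  intro message _ hD
  apply String.toList_injective
  rw [pvA_toList, pvAlt_toList, pvRep_eq_join]
  cases hl : message.toList with
  | nil => simp [pvSplit1, pvJoin, pvJoinStep]
  | cons c t =>
    have hc : c ≠ '\n' := by
      intro h; exact hD (by unfold D_split_in_columns; simp [hl, h])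
    obtain ⟨q, qs, hq⟩ := List.exists_cons_of_ne_nil (pvSplit1_ne_nil t)
    rw [show pvSplit1 (c :: t) = (pvSplit1 t).modifyHead (c :: ·) from by
      simp [pvSplit1, hc], hq]
    simp only [List.modifyHead, List.foldl_cons]
    rw [show pvJoinStep [] (c :: q) = c :: q by simp [pvJoinStep]]
    rw [pvFoldl_ne_nil qs (c :: q) (by simp)]
    simp [pvJoin]

theorem split_in_columns_changed : Claim_changed_split_in_columns := by
  unfold Claim_changed_split_in_columns; decide

theorem split_in_columns_tight : Claim_exact_split_in_columns := by
  intro message _ hD heq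
  unfold D_split_in_columns at hD
  obtain ⟨t, hl⟩ : ∃ t, message.toList = '\n' :: t := by
    cases h : message.toList with
    | nil => rw [h] at hD; simp at hD
    | cons c t => rw [h] at hD; simp at hD; exact ⟨t, by rw [hD]⟩
  have hlen : (split_in_columns message).toList.length
      < (split_in_columns_alt message).toList.length := by
    rw [pvA_toList, pvAlt_toList, hl]
    obtain ⟨q, qs, hq⟩ := List.exists_cons_of_ne_nil (pvSplit1_ne_nil t)
    rw [show pvSplit1 ('\n' :: t) = [] :: pvSplit1 t from by simp [pvSplit1], hq]
    simp only [List.foldl_cons]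
    rw [show pvJoinStep [] [] = [] by simp [pvJoinStep]]
    rw [show pvJoinStep [] q = q by simp [pvJoinStep]]
    have h1 := pvFoldl_length_le qs q
    have h2 : pvRep ('\n' :: t) = '|' :: pvJoin (pvSplit1 t) := by
      rw [show pvRep ('\n' :: t) = '|' :: pvRep t from by simp [pvRep], pvRep_eq_join]
    rw [show pvRep ('\n' :: t) = '|' :: pvJoin (pvSplit1 t) from h2, hq]
    simp only [pvJoin, List.length_cons, List.length_append]
    omega
  rw [heq] at hlen
  omega
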